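-- pv_equiv track=rewrite | github.com/leeyounwoo/Algorithm | 프로그래머스/Level 2/04. 최고의 집합/s1.py | solution
-- ===== SOURCE A (Python) =====
-- def solution(n, s):
--     value, rest = divmod(s, n)
--     if value == 0:
--         return [-1]
--     answer = [value for _ in range(n)]
--     index = n - 1
--     while rest:
--         answer[index] += 1
--         index -= 1
--         rest -= 1
--     return answer
-- ===== SOURCE B (Python) =====
-- def solution(n, s):
--     if s // n == 0:
--         return [-1]
--     # greedy peeling: the largest element of the best multiset is ceil(s/n);
--     # take it, subtract, repeat on the remaining sum, then reverse into ascending order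
--     out = []
--     while n > 0:
--         q = -(-s // n)          # ceiling division
--         out.append(q)
--         s -= q
--         n -= 1
--     out.reverse()
--     return out
-- ===== Notes on version B (the rewrite author's own statement) =====
-- stated objective: alternative
-- what changed: B never computes the remainder or initializes an n-copy list: it greedily peels the current maximum element as the ceiling ceil(s/n) = -(-s//n), subtracts it from s, repeats with n-1, and reverses the collected elements, instead of A's divmod + list of n quotients + while loop incrementing the top rest entries.
import Mathlib
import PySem

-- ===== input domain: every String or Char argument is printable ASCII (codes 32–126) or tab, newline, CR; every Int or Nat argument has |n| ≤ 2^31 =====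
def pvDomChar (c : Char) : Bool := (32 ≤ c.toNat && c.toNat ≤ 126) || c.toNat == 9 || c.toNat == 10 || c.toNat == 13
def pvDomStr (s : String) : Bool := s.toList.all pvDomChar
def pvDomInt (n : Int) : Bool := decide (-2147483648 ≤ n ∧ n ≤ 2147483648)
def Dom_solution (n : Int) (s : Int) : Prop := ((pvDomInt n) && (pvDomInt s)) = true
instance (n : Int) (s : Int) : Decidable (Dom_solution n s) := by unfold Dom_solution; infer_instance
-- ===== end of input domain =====

-- B replaces A's divmod + increment loop by greedy peeling of ceil(s/n) per step (alternative algorithm, same cost).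

-- ===== PORT A =====
-- while rest: answer[index] += 1; index -= 1; rest -= 1
-- (fuel = rest.toNat: for rest ≥ 0 this runs the loop exactly rest times, as Python does;
--  rest < 0 makes the Python loop diverge and is outside Pre_solution)
def solutionLoopA : List Int → Int → Nat → List Int
  | answer, _, 0 => answer
  | answer, index, r + 1 =>
      solutionLoopA (PySem.List.pySetD answer index (PySem.List.pyGetD answer index 0 + 1))
        (index - 1) r

def solution (n : Int) (s : Int) : List Int :=
  let value := PySem.Int.floordiv s n
  let rest := PySem.Int.mod s n
  if value = 0 then [-1]
  else
    let answer := (PySem.List.pyRange 0 n 1).map (fun _ => value)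
    solutionLoopA answer (n - 1) rest.toNat

-- ===== PORT B =====
-- while n > 0: q = -(-s // n); out.append(q); s -= q; n -= 1   (fuel = n.toNat, exact for the while-loop)
def solutionLoopB : Nat → Int → Int → List Int → List Int
  | 0, _, _, out => out
  | k + 1, nn, ss, out =>
      let q := -(PySem.Int.floordiv (-ss) nn)
      solutionLoopB k (nn - 1) (ss - q) (out ++ [q])

def solution_alt (n : Int) (s : Int) : List Int :=
  if PySem.Int.floordiv s n = 0 then [-1]
  else (solutionLoopB n.toNat n s []).reverse

-- ===== PRECONDITION & SPEC =====
-- On n = 0 Python's divmod raises ZeroDivisionError; for n < 0 with s % n ≠ 0 and s // n ≠ 0 the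
-- remainder is negative and A's `while rest:` loop never terminates — both are excluded.
def Pre_solution (n : Int) (s : Int) : Prop :=
  n ≠ 0 ∧ (0 < n ∨ PySem.Int.mod s n = 0 ∨ PySem.Int.floordiv s n = 0)
instance (n : Int) (s : Int) : Decidable (Pre_solution n s) := by unfold Pre_solution; infer_instance
def pvWitness_solution : Int × Int := (3, 11)

def Spec_solution (n : Int) (s : Int) (out : List Int) : Prop := out = solution_alt n s
instance (n : Int) (s : Int) (out : List Int) : Decidable (Spec_solution n s out) := by unfold Spec_solution; infer_instance

-- ===== CLAIM (what is proved, stated in full; the proofs are below) =====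
def Claim_equal_solution : Prop := ∀ (n : Int) (s : Int), Dom_solution n s → Pre_solution n s → Spec_solution n s (solution n s)

-- ===== LEMMAS AND PROOFS =====

-- A's loop turns the last b copies of v into v+1, leaving a given tail untouched.
theorem solutionLoopA_spec (v : Int) :
    ∀ (b a : Nat) (tail : List Int),
      solutionLoopA (List.replicate (a + b) v ++ tail) ((a : Int) + (b : Int) - 1) b
        = List.replicate a v ++ List.replicate b (v + 1) ++ tail := by
  intro b
  induction b with
  | zero => intro a tail; simp [solutionLoopA]
  | succ b ih =>
      intro a tail
      have hsplit : List.replicate (a + (b + 1)) v ++ tail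
          = List.replicate (a + b) v ++ (v :: tail) := by
        have : a + (b + 1) = (a + b) + 1 := by omega
        rw [this, List.replicate_succ', List.append_assoc]; rfl
      rw [hsplit]
      show solutionLoopA _ ((a : Int) + ((b : Int) + 1) - 1) (b + 1) = _
      have hidx : (a : Int) + ((b : Int) + 1) - 1 = ((a + b : Nat) : Int) := by push_cast; ring
      rw [hidx]
      unfold solutionLoopA
      have hget : PySem.List.pyGetD (List.replicate (a + b) v ++ (v :: tail)) ((a + b : Nat) : Int) 0 = v := by
        rw [PySem.List.pyGetD_natCast]
        simp
      have hset : PySem.List.pySetD (List.replicate (a + b) v ++ (v :: tail)) ((a + b : Nat) : Int) (v + 1)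
          = List.replicate (a + b) v ++ ((v + 1) :: tail) := by
        rw [PySem.List.pySetD_natCast]
        rw [List.set_append_right _ _ (by simp)]
        simp
      rw [hget, hset]
      have hidx2 : ((a + b : Nat) : Int) - 1 = (a : Int) + (b : Int) - 1 := by push_cast; ring
      rw [hidx2, ih a ((v + 1) :: tail)]
      simp [List.replicate_succ', List.append_assoc]

-- B's loop, run k times on sum k*v + r (0 ≤ r ≤ k), appends r copies of v+1 then k - r copies of v.
theorem solutionLoopB_spec :
    ∀ (k : Nat) (v r : Int) (acc : List Int), 0 ≤ r → r ≤ (k : Int) →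
      solutionLoopB k (k : Int) ((k : Int) * v + r) acc
        = acc ++ List.replicate r.toNat (v + 1) ++ List.replicate (k - r.toNat) v := by
  intro k
  induction k with
  | zero =>
      intro v r acc h0 h1
      have : r = 0 := by omega
      simp [solutionLoopB, this]
  | succ k ih =>
      intro v r acc h0 h1
      have hkpos : (0 : Int) < ((k : Int) + 1) := by positivity
      have hcast : ((k + 1 : Nat) : Int) = (k : Int) + 1 := by push_cast; ring
      by_cases hr : r = 0
      · -- q = v : exact division at this step
        have hq : -(PySem.Int.floordiv (-(((k : Int) + 1) * v + r)) ((k : Int) + 1)) = v := by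
          rw [PySem.Int.neg_floordiv_neg_eq_iff_of_pos hkpos]
          constructor <;> nlinarith
        show solutionLoopB k (((k + 1 : Nat) : Int) - 1)
            (((k + 1 : Nat) : Int) * v + r - -(PySem.Int.floordiv (-(((k + 1 : Nat) : Int) * v + r)) ((k + 1 : Nat) : Int)))
            (acc ++ [-(PySem.Int.floordiv (-(((k + 1 : Nat) : Int) * v + r)) ((k + 1 : Nat) : Int))]) = _
        rw [hcast, hq]
        have hs : ((k : Int) + 1) * v + r - v = (k : Int) * v + 0 := by rw [hr]; ring
        rw [hs, show (k : Int) + 1 - 1 = (k : Int) by ring,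
          ih v 0 (acc ++ [v]) le_rfl (by positivity)]
        subst hr
        simp [List.replicate_succ, List.append_assoc]
      · -- q = v + 1 : r > 0, one extra unit is taken at this step
        have hrpos : 0 < r := lt_of_le_of_ne h0 (Ne.symm hr)
        have h1' : r ≤ (k : Int) + 1 := by rw [← hcast]; exact h1
        have hq : -(PySem.Int.floordiv (-(((k : Int) + 1) * v + r)) ((k : Int) + 1)) = v + 1 := by
          rw [PySem.Int.neg_floordiv_neg_eq_iff_of_pos hkpos]
          constructor <;> nlinarith
        show solutionLoopB k (((k + 1 : Nat) : Int) - 1)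
            (((k + 1 : Nat) : Int) * v + r - -(PySem.Int.floordiv (-(((k + 1 : Nat) : Int) * v + r)) ((k + 1 : Nat) : Int)))
            (acc ++ [-(PySem.Int.floordiv (-(((k + 1 : Nat) : Int) * v + r)) ((k + 1 : Nat) : Int))]) = _
        rw [hcast, hq]
        have hs : ((k : Int) + 1) * v + r - (v + 1) = (k : Int) * v + (r - 1) := by ring
        rw [hs, show (k : Int) + 1 - 1 = (k : Int) by ring,
          ih v (r - 1) (acc ++ [v + 1]) (by omega) (by omega)]
        have ht : r.toNat = (r - 1).toNat + 1 := by omega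
        rw [ht, List.replicate_succ]
        have ht2 : k + 1 - ((r - 1).toNat + 1) = k - (r - 1).toNat := by omega
        rw [ht2]
        simp [List.append_assoc]

-- ===== VERDICT (by name: the statement is the Claim_ definition above) =====
theorem solution_spec : Claim_equal_solution := by
  intro n s _ hpre
  obtain ⟨hn0, hcase⟩ := hpre
  unfold Spec_solution solution solution_alt
  simp only []
  set value := PySem.Int.floordiv s n with hv
  set rest := PySem.Int.mod s n with hr
  by_cases hz : value = 0
  · simp [hz]
  · simp only [hz, if_false]
    rcases lt_or_gt_of_ne hn0 with hneg | hn
    · -- n < 0 : Pre gives rest = 0; A's range is empty, B's while loop never runs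
      have hmod : rest = 0 := by
        rcases hcase with hpos | hmod | hval
        · omega
        · exact hmod
        · exact absurd hval hz
      have hrange : PySem.List.pyRange 0 n 1 = [] := by
        rw [PySem.List.pyRange_one]
        have : (n - 0).toNat = 0 := by omega
        rw [this]; simp
      have htn : n.toNat = 0 := by omega
      rw [hmod, hrange, htn]
      simp [solutionLoopA, solutionLoopB]
    · -- n > 0 : 0 ≤ rest < n; both sides equal the same replicate-pair
      have hr0 : 0 ≤ rest := PySem.Int.mod_nonneg s hn
      have hrlt : rest < n := PySem.Int.mod_lt s hn
      have hmapconst : (PySem.List.pyRange 0 n 1).map (fun _ => value)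
          = List.replicate (PySem.List.pyRange 0 n 1).length value := by
        simp [List.map_const']
      have hlenr : (PySem.List.pyRange 0 n 1).length = n.toNat := by
        rw [PySem.List.length_pyRange_one]; simp
      have hnat : n.toNat = (n - rest).toNat + rest.toNat := by omega
      have hidx : n - 1 = ((n - rest).toNat : Int) + (rest.toNat : Int) - 1 := by omega
      have hAeq : solutionLoopA (List.replicate n.toNat value) (n - 1) rest.toNat
          = List.replicate (n - rest).toNat value ++ List.replicate rest.toNat (value + 1) := by
        rw [hnat, hidx]
        have := solutionLoopA_spec value rest.toNat (n - rest).toNat []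
        simpa using this
      have hkcast : ((n.toNat : Nat) : Int) = n := by omega
      have hksum : ((n.toNat : Nat) : Int) * value + rest = s := by
        have hsum := PySem.Int.floordiv_mul_add_mod s n
        rw [hkcast, ← hv, ← hr] at *
        nlinarith [hsum]
      have hBeq : solutionLoopB n.toNat n s []
          = List.replicate rest.toNat (value + 1) ++ List.replicate (n.toNat - rest.toNat) value := by
        have h := solutionLoopB_spec n.toNat value rest [] hr0 (by omega)
        rw [hkcast] at h
        have hksum' : n * value + rest = s := by rw [← hkcast]; exact hksum
        rw [hksum'] at h
        simpa using h
      rw [hmapconst, hlenr, hAeq, hBeq, List.reverse_append]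
      have hsub : n.toNat - rest.toNat = (n - rest).toNat := by omega
      simp [hsub]
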